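-- pv_equiv track=rewrite | github.com/veda9424/DSA | tram_ride.py | min_travel_cost
-- ===== SOURCE A (Python) =====
-- def min_travel_cost(N,start,finish,ticket_cost):    # N = no. of stations
--     if start == finish:
--         return 0
--
--     #  adjust the index according to the stations there cant be station 0 - 1 therefore
--     start -= 1
--     finish -= 1
--
--     # minimum clockwise cost:
--     i = start      # if start is station 1 it will be converted to index 0
--     cw_cost = 0    # at start ticket cost will be 0    eg: ticket_cost = [5,10,15,20]  start = 1   finish = 2
--     while i != finish:
--         cw_cost += ticket_cost[i]    # from station 1 - 2  cw_cost = {staion[1] or ticket_cost[0]} + cw_cost = 5 + 0 = 5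
--         i = (i + 1) % N    # move one step forwward
--
--     # for minimum anti-clockwise cost:
--     i = start
--     ac_cost = 0
--     while i != finish:
--         i = (i - 1 + N) % N     # move one step backward
--         ac_cost += ticket_cost[i]
--
--     return min(cw_cost,ac_cost)
-- ===== SOURCE B (Python) =====
-- def min_travel_cost(N, start, finish, ticket_cost):
--     if start == finish:
--         return 0
--     s, f = start - 1, finish - 1
--     d = (f - s) % N  # clockwise arc length, in closed form
--     cw = sum(ticket_cost[(s + k) % N] for k in range(d))
--     total = sum(ticket_cost[k] for k in range(N))
--     return min(cw, total - cw)
-- ===== Notes on version B (the rewrite author's own statement) =====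
-- stated objective: simpler
-- what changed: B replaces both of A's state-stepping while loops by closed forms: the clockwise arc length is d = (finish-start) % N, its cost a sum over range(d), and the anticlockwise cost is total - cw with total = sum of the first N ticket costs, since the two arcs partition the N edges of the circle.
-- outside the precondition, e.g. on min_travel_cost(2, -1, 1, [1, 3]): A returns 4, B returns 0; on min_travel_cost(1, 0, 1, [1]): A returns 1, B returns 0; on min_travel_cost(2, 5, 1, [4, -1, 7, -2, -2, 8]): A returns -3, B returns 0
import Mathlib
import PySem

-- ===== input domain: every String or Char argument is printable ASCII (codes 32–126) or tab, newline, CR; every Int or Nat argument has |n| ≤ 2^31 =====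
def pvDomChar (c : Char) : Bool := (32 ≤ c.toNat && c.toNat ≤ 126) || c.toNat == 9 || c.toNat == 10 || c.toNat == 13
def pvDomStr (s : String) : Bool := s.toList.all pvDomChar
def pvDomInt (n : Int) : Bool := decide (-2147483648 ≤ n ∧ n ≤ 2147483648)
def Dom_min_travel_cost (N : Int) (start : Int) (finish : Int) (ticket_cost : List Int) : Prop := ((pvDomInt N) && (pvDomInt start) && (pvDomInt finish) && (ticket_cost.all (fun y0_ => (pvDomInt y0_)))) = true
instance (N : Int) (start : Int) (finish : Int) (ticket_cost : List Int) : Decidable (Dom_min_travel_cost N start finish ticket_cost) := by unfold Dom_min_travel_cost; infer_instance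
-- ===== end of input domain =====

-- B replaces both of A's state-stepping while loops by closed forms: arc length d = (f-s) % N,
-- cw = sum over range(d), and anticlockwise = total - cw (the arcs partition the N edges); objective: simpler.

-- ===== PORT A =====
-- A's clockwise while loop; the fuel only makes the recursion total (inside Pre_ the loop ends within N steps)
def pvCwLoopA (tc : List Int) (N f : Int) : Nat → Int → Int → Int
  | 0, _, acc => acc
  | fuel+1, i, acc =>
    if i = f then acc
    else pvCwLoopA tc N f fuel (PySem.Int.mod (i + 1) N) (acc + PySem.List.pyGetD tc i 0)

-- A's anticlockwise while loop
def pvAcLoopA (tc : List Int) (N f : Int) : Nat → Int → Int → Int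
  | 0, _, acc => acc
  | fuel+1, i, acc =>
    if i = f then acc
    else
      pvAcLoopA tc N f fuel (PySem.Int.mod (i - 1 + N) N)
        (acc + PySem.List.pyGetD tc (PySem.Int.mod (i - 1 + N) N) 0)

def min_travel_cost (N : Int) (start : Int) (finish : Int) (ticket_cost : List Int) : Int :=
  if start = finish then 0
  else
    min (pvCwLoopA ticket_cost N (finish - 1) (N.natAbs + 1) (start - 1) 0)
        (pvAcLoopA ticket_cost N (finish - 1) (N.natAbs + 1) (start - 1) 0)

-- ===== PORT B =====
-- closed-form arc length, generator sums instead of while loops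
def min_travel_cost_alt (N : Int) (start : Int) (finish : Int) (ticket_cost : List Int) : Int :=
  if start = finish then 0
  else
    let s := start - 1
    let f := finish - 1
    let d := PySem.Int.mod (f - s) N
    let cw := ((PySem.List.pyRange 0 d 1).map
      (fun k => PySem.List.pyGetD ticket_cost (PySem.Int.mod (s + k) N) 0)).sum
    let total := ((PySem.List.pyRange 0 N 1).map
      (fun k => PySem.List.pyGetD ticket_cost k 0)).sum
    min cw (total - cw)

-- ===== PRECONDITION & SPEC =====
-- Pre_ is the function's natural domain — stations 1..N with at least N ticket costs — plus the
-- negative start aliases 1-N..0 on an exactly-N-long list, where Python's negative indexing equals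
-- index mod N and A and B agree. Outside it A diverges, raises IndexError, or (for other station
-- numbers outside 1..N) returns a value from raw Python indexing, which B does not reproduce.
def Pre_min_travel_cost (N : Int) (start : Int) (finish : Int) (ticket_cost : List Int) : Prop :=
  start = finish ∨
    (1 ≤ N ∧ N ≤ (ticket_cost.length : Int) ∧ 1 ≤ finish ∧ finish ≤ N ∧
      ((1 ≤ start ∧ start ≤ N) ∨
       ((ticket_cost.length : Int) = N ∧ 1 - N ≤ start ∧ start ≤ 0 ∧ finish - start ≠ N)))
instance (N : Int) (start : Int) (finish : Int) (ticket_cost : List Int) : Decidable (Pre_min_travel_cost N start finish ticket_cost) := by unfold Pre_min_travel_cost; infer_instance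

def pvWitness_min_travel_cost : Int × Int × Int × List Int := (4, 1, 3, [1, 2, 3, 4])

def Spec_min_travel_cost (N : Int) (start : Int) (finish : Int) (ticket_cost : List Int) (out : Int) : Prop := out = min_travel_cost_alt N start finish ticket_cost
instance (N : Int) (start : Int) (finish : Int) (ticket_cost : List Int) (out : Int) : Decidable (Spec_min_travel_cost N start finish ticket_cost out) := by unfold Spec_min_travel_cost; infer_instance

-- ===== CLAIM (what is proved, stated in full; the proofs are below) =====
def Claim_equal_min_travel_cost : Prop := ∀ (N : Int) (start : Int) (finish : Int) (ticket_cost : List Int), Dom_min_travel_cost N start finish ticket_cost → Pre_min_travel_cost N start finish ticket_cost → Spec_min_travel_cost N start finish ticket_cost (min_travel_cost N start finish ticket_cost)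

-- ===== LEMMAS AND PROOFS =====

-- emod of a value already in (-N, N)
theorem pv_emod_small (N a : Int) (_hN : 0 < N) (h1 : -N < a) (h2 : a < N) :
    a % N = if 0 ≤ a then a else a + N := by
  split
  · exact Int.emod_eq_of_lt ‹_› h2
  · have h3 : (a + N) % N = a % N := by simpa using Int.add_mul_emod_self_left a N 1
    rw [← h3]
    exact Int.emod_eq_of_lt (by omega) (by omega)

-- cost of the edge leaving station index j (index taken mod N)
def pvT (tc : List Int) (N j : Int) : Int := PySem.List.pyGetD tc (PySem.Int.mod j N) 0

-- sum of d consecutive edge costs clockwise from index i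
def pvG (tc : List Int) (N : Int) : Nat → Int → Int
  | 0, _ => 0
  | d+1, i => pvT tc N i + pvG tc N d (i + 1)

theorem pvT_congr (tc : List Int) (N : Int) (hN : 0 < N) {j j' : Int} (h : j % N = j' % N) :
    pvT tc N j = pvT tc N j' := by
  simp only [pvT, PySem.Int.mod_eq_emod_of_pos hN, h]

theorem pvG_congr (tc : List Int) (N : Int) (hN : 0 < N) :
    ∀ (d : Nat) {j j' : Int}, j % N = j' % N → pvG tc N d j = pvG tc N d j' := by
  intro d
  induction d with
  | zero => intro j j' _; rfl
  | succ d ih =>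
    intro j j' h
    have h1 : (j + 1) % N = (j' + 1) % N := by rw [Int.add_emod, h, ← Int.add_emod]
    simp only [pvG, pvT_congr tc N hN h, ih h1]

theorem pvG_snoc (tc : List Int) (N : Int) :
    ∀ (d : Nat) (i : Int), pvG tc N (d + 1) i = pvG tc N d i + pvT tc N (i + d) := by
  intro d
  induction d with
  | zero => intro i; simp [pvG]
  | succ d ih =>
    intro i
    have h1 : pvG tc N (d + 1 + 1) i = pvT tc N i + pvG tc N (d + 1) (i + 1) := rfl
    have h2 : (i + 1 + (d : Int)) = i + ((d : Int) + 1) := by ring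
    rw [h1, ih (i + 1), h2]
    show _ = pvT tc N i + pvG tc N d (i + 1) + pvT tc N (i + ((d : Nat) + 1 : Nat))
    push_cast
    ring

theorem pvG_append (tc : List Int) (N : Int) :
    ∀ (d e : Nat) (i : Int), pvG tc N (d + e) i = pvG tc N d i + pvG tc N e (i + d) := by
  intro d
  induction d with
  | zero => intro e i; simp [pvG]
  | succ d ih =>
    intro e i
    have h1 : d + 1 + e = (d + e) + 1 := by omega
    have h2 : pvG tc N (d + e + 1) i = pvT tc N i + pvG tc N (d + e) (i + 1) := rfl
    have h3 : (i + 1 + (d : Int)) = i + ((d : Int) + 1) := by ring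
    rw [h1, h2, ih e (i + 1), h3]
    show _ = pvT tc N i + pvG tc N d (i + 1) + pvG tc N e (i + ((d : Nat) + 1 : Nat))
    push_cast
    ring

theorem pvG_rot (tc : List Int) (N : Int) (hN : 0 < N) (j : Int) :
    pvG tc N N.toNat (j + 1) = pvG tc N N.toNat j := by
  obtain ⟨n, hn⟩ : ∃ n, N.toNat = n + 1 := ⟨N.toNat - 1, by omega⟩
  have hc : (n : Int) + 1 = N := by omega
  rw [hn, pvG_snoc tc N n (j + 1)]
  have hshift : (j + 1 + (n : Int)) % N = j % N := by
    have he : j + 1 + (n : Int) = j + N := by omega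
    rw [he]
    simpa using Int.add_mul_emod_self_left j N 1
  rw [pvT_congr tc N hN hshift]
  have h2 : pvG tc N (n + 1) j = pvT tc N j + pvG tc N n (j + 1) := rfl
  rw [h2, add_comm]

theorem pvG_full (tc : List Int) (N : Int) (hN : 0 < N) (s : Int) (hs : 0 ≤ s) :
    pvG tc N N.toNat s = pvG tc N N.toNat 0 := by
  have key : ∀ (k : Nat), pvG tc N N.toNat (k : Int) = pvG tc N N.toNat 0 := by
    intro k
    induction k with
    | zero => rfl
    | succ k ih =>
      have : ((k + 1 : Nat) : Int) = (k : Int) + 1 := by push_cast; ring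
      rw [this, pvG_rot tc N hN, ih]
  have : s = (s.toNat : Int) := by omega
  rw [this, key]

theorem pvCwLoopA_eq (tc : List Int) (N f : Int) (hN : 0 < N) (hf0 : 0 ≤ f) (hfN : f < N) :
    ∀ (fuel : Nat) (i acc : Int), 0 ≤ i → i < N → ((f - i) % N).toNat ≤ fuel →
      pvCwLoopA tc N f fuel i acc = acc + pvG tc N ((f - i) % N).toNat i := by
  intro fuel
  induction fuel with
  | zero =>
    intro i acc hi0 hiN hfuel
    have hnn : 0 ≤ (f - i) % N := Int.emod_nonneg _ (by omega)
    have hz : ((f - i) % N).toNat = 0 := by omega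
    simp [pvCwLoopA, hz, pvG]
  | succ fuel ih =>
    intro i acc hi0 hiN hfuel
    by_cases hif : i = f
    · have hz : ((f - i) % N).toNat = 0 := by
        rw [hif]; simp
      simp [pvCwLoopA, hif, pvG]
    · have hxnn : 0 ≤ (f - i) % N := Int.emod_nonneg _ (by omega)
      have hxN : (f - i) % N < N := Int.emod_lt_of_pos _ hN
      have hxpos : 0 < (f - i) % N := by
        rw [pv_emod_small N (f - i) hN (by omega) (by omega)]
        split <;> omega
      have hi'def : PySem.Int.mod (i + 1) N = (i + 1) % N := PySem.Int.mod_eq_emod_of_pos hN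
      have hi'r : 0 ≤ (i + 1) % N ∧ (i + 1) % N < N :=
        ⟨Int.emod_nonneg _ (by omega), Int.emod_lt_of_pos _ hN⟩
      -- distance decreases by one
      have hdist : (f - (i + 1) % N) % N = (f - i) % N - 1 := by
        have e1 : (f - (i + 1) % N) % N = (f - (i + 1)) % N := by
          rw [Int.sub_emod f ((i + 1) % N) N, Int.emod_emod_of_dvd _ dvd_rfl, ← Int.sub_emod]
        have e2 : (f - (i + 1)) % N = ((f - i) % N - 1) % N := by
          have : f - (i + 1) = (f - i) - 1 := by ring
          rw [this, Int.sub_emod (f - i) 1 N, Int.sub_emod ((f - i) % N) 1 N,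
            Int.emod_emod_of_dvd _ dvd_rfl]
        rw [e1, e2]
        exact Int.emod_eq_of_lt (by omega) (by omega)
      have hfuel' : ((f - (i + 1) % N) % N).toNat ≤ fuel := by rw [hdist]; omega
      have step : pvCwLoopA tc N f (fuel + 1) i acc
          = pvCwLoopA tc N f fuel (PySem.Int.mod (i + 1) N) (acc + PySem.List.pyGetD tc i 0) := by
        simp [pvCwLoopA, hif]
      rw [step, hi'def, ih _ _ hi'r.1 hi'r.2 hfuel', hdist]
      -- fold back one step of pvG
      have hd : ((f - i) % N).toNat = (((f - i) % N - 1).toNat) + 1 := by omega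
      have hunf : pvG tc N ((((f - i) % N - 1).toNat) + 1) i
          = pvT tc N i + pvG tc N (((f - i) % N - 1).toNat) (i + 1) := rfl
      have hgc : pvG tc N (((f - i) % N - 1).toNat) ((i + 1) % N)
          = pvG tc N (((f - i) % N - 1).toNat) (i + 1) :=
        pvG_congr tc N hN _ (Int.emod_emod_of_dvd _ dvd_rfl)
      have hT : pvT tc N i = PySem.List.pyGetD tc i 0 := by
        simp only [pvT, PySem.Int.mod_eq_emod_of_pos hN, Int.emod_eq_of_lt hi0 hiN]
      rw [hd, hunf, hgc, hT]
      ring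

theorem pvAcLoopA_eq (tc : List Int) (N f : Int) (hN : 0 < N) (hf0 : 0 ≤ f) (hfN : f < N) :
    ∀ (fuel : Nat) (i acc : Int), 0 ≤ i → i < N → ((i - f) % N).toNat ≤ fuel →
      pvAcLoopA tc N f fuel i acc = acc + pvG tc N ((i - f) % N).toNat (i - (i - f) % N) := by
  intro fuel
  induction fuel with
  | zero =>
    intro i acc hi0 hiN hfuel
    have hnn : 0 ≤ (i - f) % N := Int.emod_nonneg _ (by omega)
    have hz : ((i - f) % N).toNat = 0 := by omega
    simp [pvAcLoopA, hz, pvG]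
  | succ fuel ih =>
    intro i acc hi0 hiN hfuel
    by_cases hif : i = f
    · have hz : ((i - f) % N).toNat = 0 := by rw [hif]; simp
      simp [pvAcLoopA, hif, pvG]
    · have hxnn : 0 ≤ (i - f) % N := Int.emod_nonneg _ (by omega)
      have hxN : (i - f) % N < N := Int.emod_lt_of_pos _ hN
      have hxpos : 0 < (i - f) % N := by
        rw [pv_emod_small N (i - f) hN (by omega) (by omega)]
        split <;> omega
      have hi'def : PySem.Int.mod (i - 1 + N) N = (i - 1 + N) % N := PySem.Int.mod_eq_emod_of_pos hN
      have hi'r : 0 ≤ (i - 1 + N) % N ∧ (i - 1 + N) % N < N :=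
        ⟨Int.emod_nonneg _ (by omega), Int.emod_lt_of_pos _ hN⟩
      have hi'mod : (i - 1 + N) % N = (i - 1) % N := by
        simpa using Int.add_mul_emod_self_left (i - 1) N 1
      -- distance decreases by one
      have hdist : ((i - 1 + N) % N - f) % N = (i - f) % N - 1 := by
        have e1 : ((i - 1 + N) % N - f) % N = (i - 1 - f) % N := by
          rw [Int.sub_emod ((i - 1 + N) % N) f N, Int.emod_emod_of_dvd _ dvd_rfl, hi'mod,
            ← Int.sub_emod]
        have e2 : (i - 1 - f) % N = ((i - f) % N - 1) % N := by
          have : i - 1 - f = (i - f) - 1 := by ring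
          rw [this, Int.sub_emod (i - f) 1 N, Int.sub_emod ((i - f) % N) 1 N,
            Int.emod_emod_of_dvd _ dvd_rfl]
        rw [e1, e2]
        exact Int.emod_eq_of_lt (by omega) (by omega)
      have hfuel' : (((i - 1 + N) % N - f) % N).toNat ≤ fuel := by rw [hdist]; omega
      have step : pvAcLoopA tc N f (fuel + 1) i acc
          = pvAcLoopA tc N f fuel (PySem.Int.mod (i - 1 + N) N)
              (acc + PySem.List.pyGetD tc (PySem.Int.mod (i - 1 + N) N) 0) := by
        simp [pvAcLoopA, hif]
      rw [step, hi'def, ih _ _ hi'r.1 hi'r.2 hfuel', hdist]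
      -- fold back one pvG step, at the BACK of the arc (pvG_snoc)
      have hd : ((i - f) % N).toNat = (((i - f) % N - 1).toNat) + 1 := by omega
      have hsn : pvG tc N ((((i - f) % N - 1).toNat) + 1) (i - (i - f) % N)
          = pvG tc N (((i - f) % N - 1).toNat) (i - (i - f) % N)
            + pvT tc N (i - (i - f) % N + (((i - f) % N - 1).toNat : Int)) :=
        pvG_snoc tc N _ _
      have hcast : (((i - f) % N - 1).toNat : Int) = (i - f) % N - 1 := by omega
      have hidx : i - (i - f) % N + ((i - f) % N - 1) = i - 1 := by ring
      -- the element picked by the loop equals pvT at i - 1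
      have hTeq : PySem.List.pyGetD tc ((i - 1 + N) % N) 0 = pvT tc N (i - 1) := by
        have : ((i - 1 + N) % N) % N = (i - 1) % N := by
          rw [Int.emod_emod_of_dvd _ dvd_rfl, hi'mod]
        simp only [pvT, PySem.Int.mod_eq_emod_of_pos hN, hi'mod]
      -- the recursive sum starts one step earlier
      have hgc : pvG tc N (((i - f) % N - 1).toNat) ((i - 1 + N) % N - ((i - 1 + N) % N - f) % N)
          = pvG tc N (((i - f) % N - 1).toNat) (i - (i - f) % N) := by
        apply pvG_congr tc N hN
        rw [hdist]
        have : (i - 1 + N) % N - ((i - f) % N - 1) = (i - 1) % N - (i - f) % N + 1 := by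
          rw [hi'mod]; ring
        rw [hdist] at *
        rw [this]
        -- (i-1)%N - x + 1 ≡ i - x  (mod N)
        rw [Int.add_emod ((i - 1) % N - (i - f) % N) 1 N, Int.sub_emod ((i - 1) % N) _ N,
          Int.emod_emod_of_dvd _ dvd_rfl, ← Int.sub_emod, ← Int.add_emod]
        have : i - 1 - (i - f) % N + 1 = i - (i - f) % N := by ring
        rw [this]
      rw [hdist] at hgc
      rw [hgc, hd, hsn, hcast, hidx, hTeq]
      ring

-- a generator sum over range(d) of edge costs mod N is a pvG arc
theorem pv_mapRange_sum_cw (tc : List Int) (N s : Int) :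
    ∀ (d : Nat), ((PySem.List.pyRange 0 (d : Int) 1).map
      (fun k => PySem.List.pyGetD tc (PySem.Int.mod (s + k) N) 0)).sum = pvG tc N d s := by
  intro d
  induction d with
  | zero => rw [PySem.List.pyRange_one_eq_nil (by omega)]; rfl
  | succ d ih =>
    have hc : ((d + 1 : Nat) : Int) = (d : Int) + 1 := by push_cast; ring
    rw [hc, PySem.List.pyRange_one_succ_right (by omega), List.map_append, List.sum_append]
    rw [ih]
    have hsn := pvG_snoc tc N d s
    simp only [List.map_cons, List.map_nil, List.sum_cons, List.sum_nil, add_zero] at *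
    rw [hsn]
    rfl

-- the sum of the first k ticket costs is the arc from index 0
theorem pv_mapRange_sum_tot (tc : List Int) (N : Int) (hN : 0 < N) :
    ∀ (k : Nat), k ≤ N.toNat → ((PySem.List.pyRange 0 (k : Int) 1).map
      (fun j => PySem.List.pyGetD tc j 0)).sum = pvG tc N k 0 := by
  intro k
  induction k with
  | zero => intro _; rw [PySem.List.pyRange_one_eq_nil (by omega)]; rfl
  | succ k ih =>
    intro hk
    have hc : ((k + 1 : Nat) : Int) = (k : Int) + 1 := by push_cast; ring
    rw [hc, PySem.List.pyRange_one_succ_right (by omega), List.map_append, List.sum_append]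
    rw [ih (by omega)]
    have hsn := pvG_snoc tc N k 0
    have hT : pvT tc N (0 + (k : Int)) = PySem.List.pyGetD tc (k : Int) 0 := by
      have hm : (0 + (k : Int)) % N = (k : Int) := by
        rw [zero_add]; exact Int.emod_eq_of_lt (by omega) (by omega)
      simp only [pvT, PySem.Int.mod_eq_emod_of_pos hN, hm]
    rw [hT] at hsn
    simp only [List.map_cons, List.map_nil, List.sum_cons, List.sum_nil, add_zero]
    rw [hsn]

-- (a + N) % N = a % N, the one-revolution shift
theorem pv_shift (a N : Int) : (a + N) % N = a % N := by
  simpa using Int.add_mul_emod_self_left a N 1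

-- pvG over a full revolution is independent of the starting index (any s)
theorem pvG_full' (tc : List Int) (N : Int) (hN : 0 < N) (s : Int) :
    pvG tc N N.toNat s = pvG tc N N.toNat 0 := by
  have h1 : pvG tc N N.toNat s = pvG tc N N.toNat (s % N) :=
    pvG_congr tc N hN _ (Int.emod_emod_of_dvd _ dvd_rfl).symm
  rw [h1]
  exact pvG_full tc N hN (s % N) (Int.emod_nonneg _ (by omega))

-- the two arcs (cw from s, ac ending at s) concatenate to the whole circle
theorem pv_hkey (tc : List Int) (N s f : Int) (hN : 0 < N)
    (hxy : (f - s) % N + (s - f) % N = N) :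
    pvG tc N ((f - s) % N).toNat s
      + pvG tc N ((s - f) % N).toNat (s - (s - f) % N)
      = pvG tc N N.toNat 0 := by
  have hxnn : 0 ≤ (f - s) % N := Int.emod_nonneg _ (by omega)
  have hynn : 0 ≤ (s - f) % N := Int.emod_nonneg _ (by omega)
  have hcongr : pvG tc N ((s - f) % N).toNat (s - (s - f) % N)
      = pvG tc N ((s - f) % N).toNat (s + (((f - s) % N).toNat : Int)) := by
    apply pvG_congr tc N hN
    have hc : (((f - s) % N).toNat : Int) = (f - s) % N := by omega
    rw [hc]
    have e : s - (s - f) % N = s + (f - s) % N + N * (-1) := by omega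
    rw [e, Int.add_mul_emod_self_left]
  rw [hcongr, ← pvG_append tc N]
  have hsum : ((f - s) % N).toNat + ((s - f) % N).toNat = N.toNat := by omega
  rw [hsum]
  exact pvG_full' tc N hN s

-- ===== VERDICT (by name: the statement is the Claim_ definition above) =====
theorem min_travel_cost_spec : Claim_equal_min_travel_cost := by
  intro N start finish tc _ hpre
  unfold Spec_min_travel_cost min_travel_cost min_travel_cost_alt
  by_cases hsf : start = finish
  · simp [hsf]
  · obtain ⟨hN1, hlen, h3, h4, hcase⟩ := hpre.resolve_left hsf
    simp only [if_neg hsf]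
    have hN : 0 < N := by omega
    have hf0 : 0 ≤ finish - 1 := by omega
    have hfN : finish - 1 < N := by omega
    have hxnn : 0 ≤ (finish - 1 - (start - 1)) % N := Int.emod_nonneg _ (by omega)
    have hxN : (finish - 1 - (start - 1)) % N < N := Int.emod_lt_of_pos _ hN
    have hynn : 0 ≤ (start - 1 - (finish - 1)) % N := Int.emod_nonneg _ (by omega)
    have hyN : (start - 1 - (finish - 1)) % N < N := Int.emod_lt_of_pos _ hN
    -- B's total: sum over range(N) = the whole circle
    have hNc : ((N.toNat : Nat) : Int) = N := by omega
    have htot : ((PySem.List.pyRange 0 N 1).map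
        (fun k => PySem.List.pyGetD tc k 0)).sum = pvG tc N N.toNat 0 := by
      have h := pv_mapRange_sum_tot tc N hN N.toNat (by omega)
      rw [hNc] at h
      exact h
    -- B's clockwise generator sum = the clockwise arc
    have hdc : PySem.Int.mod (finish - 1 - (start - 1)) N
        = ((((finish - 1 - (start - 1)) % N).toNat : Nat) : Int) := by
      rw [PySem.Int.mod_eq_emod_of_pos hN]; omega
    have hcwB : ((PySem.List.pyRange 0 (PySem.Int.mod (finish - 1 - (start - 1)) N) 1).map
        (fun k => PySem.List.pyGetD tc (PySem.Int.mod (start - 1 + k) N) 0)).sum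
        = pvG tc N ((finish - 1 - (start - 1)) % N).toNat (start - 1) := by
      rw [hdc]
      exact pv_mapRange_sum_cw tc N (start - 1) _
    -- in both Pre_ branches, A's two loops compute the two pvG arcs and the arcs partition the circle
    have key : (finish - 1 - (start - 1)) % N + (start - 1 - (finish - 1)) % N = N
        ∧ pvCwLoopA tc N (finish - 1) (N.natAbs + 1) (start - 1) 0
            = pvG tc N ((finish - 1 - (start - 1)) % N).toNat (start - 1)
        ∧ pvAcLoopA tc N (finish - 1) (N.natAbs + 1) (start - 1) 0
            = pvG tc N ((start - 1 - (finish - 1)) % N).toNat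
                (start - 1 - (start - 1 - (finish - 1)) % N) := by
      rcases hcase with ⟨h1, h2⟩ | ⟨hLN, hw1, hw2, hw3⟩
      · -- natural case: 1 ≤ start ≤ N
        have hs0 : 0 ≤ start - 1 := by omega
        have hsN : start - 1 < N := by omega
        have hxv : (finish - 1 - (start - 1)) % N
            = if 0 ≤ finish - start then finish - start else finish - start + N := by
          have e : finish - 1 - (start - 1) = finish - start := by ring
          rw [e, pv_emod_small N _ hN (by omega) (by omega)]
        have hyv : (start - 1 - (finish - 1)) % N
            = if 0 ≤ start - finish then start - finish else start - finish + N := by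
          have e : start - 1 - (finish - 1) = start - finish := by ring
          rw [e, pv_emod_small N _ hN (by omega) (by omega)]
        refine ⟨by rw [hxv, hyv]; split <;> split <;> omega, ?_, ?_⟩
        · have h := pvCwLoopA_eq tc N (finish - 1) hN hf0 hfN (N.natAbs + 1) (start - 1) 0
            hs0 hsN (by omega)
          rw [h, zero_add]
        · have h := pvAcLoopA_eq tc N (finish - 1) hN hf0 hfN (N.natAbs + 1) (start - 1) 0
            hs0 hsN (by omega)
          rw [h, zero_add]
      · -- alias case: list of length exactly N, 1-N ≤ start ≤ 0, finish - start ≠ N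
        have hfs1 : 1 ≤ finish - start := by omega
        have hfs2 : finish - start ≤ 2 * N - 1 := by omega
        -- characterise the two arc lengths
        have hx : (finish - 1 - (start - 1)) % N
            = if finish - start < N then finish - start else finish - start - N := by
          have e : finish - 1 - (start - 1) = finish - start := by ring
          rw [e]
          split
          · exact Int.emod_eq_of_lt (by omega) (by omega)
          · have h' : (finish - start) % N = (finish - start - N) % N := by
              conv_lhs => rw [show finish - start = finish - start - N + N by ring]
              exact pv_shift _ N
            rw [h']
            exact Int.emod_eq_of_lt (by omega) (by omega)
        have hy : (start - 1 - (finish - 1)) % N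
            = if -N ≤ start - finish then start - finish + N else start - finish + 2 * N := by
          have e : start - 1 - (finish - 1) = start - finish := by ring
          rw [e]
          split
          · have h' : (start - finish) % N = (start - finish + N) % N := (pv_shift _ N).symm
            rw [h']
            exact Int.emod_eq_of_lt (by omega) (by omega)
          · have h' : (start - finish) % N = (start - finish + 2 * N) % N := by
              rw [show start - finish + 2 * N = start - finish + N + N by ring,
                pv_shift _ N, pv_shift _ N]
            rw [h']
            exact Int.emod_eq_of_lt (by omega) (by omega)
        have hxpos : 1 ≤ (finish - 1 - (start - 1)) % N := by rw [hx]; split <;> omega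
        have hypos : 1 ≤ (start - 1 - (finish - 1)) % N := by rw [hy]; split <;> omega
        have hsne : start - 1 ≠ finish - 1 := by omega
        refine ⟨by rw [hx, hy]; split <;> split <;> omega, ?_, ?_⟩
        · -- clockwise loop: peel the first (negative-index) step, then the invariant
          have hpeel : pvCwLoopA tc N (finish - 1) (N.natAbs + 1) (start - 1) 0
              = pvCwLoopA tc N (finish - 1) N.natAbs (PySem.Int.mod (start - 1 + 1) N)
                  (0 + PySem.List.pyGetD tc (start - 1) 0) := by
            simp [pvCwLoopA, hsne]
          have hi1 : PySem.Int.mod (start - 1 + 1) N = start % N := by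
            rw [PySem.Int.mod_eq_emod_of_pos hN]
            norm_num
          have hi1r : 0 ≤ start % N ∧ start % N < N :=
            ⟨Int.emod_nonneg _ (by omega), Int.emod_lt_of_pos _ hN⟩
          have hdist : (finish - 1 - start % N) % N = (finish - 1 - (start - 1)) % N - 1 := by
            have e1 : (finish - 1 - start % N) % N = (finish - 1 - start) % N := by
              rw [Int.sub_emod (finish - 1) (start % N) N, Int.emod_emod_of_dvd _ dvd_rfl,
                ← Int.sub_emod]
            have e2 : (finish - 1 - start) % N = ((finish - 1 - (start - 1)) % N - 1) % N := by
              have e3 : finish - 1 - start = finish - 1 - (start - 1) - 1 := by ring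
              rw [e3, Int.sub_emod (finish - 1 - (start - 1)) 1 N,
                Int.sub_emod ((finish - 1 - (start - 1)) % N) 1 N,
                Int.emod_emod_of_dvd _ dvd_rfl]
            rw [e1, e2]
            exact Int.emod_eq_of_lt (by omega) (by omega)
          have hrest := pvCwLoopA_eq tc N (finish - 1) hN hf0 hfN N.natAbs (start % N)
            (0 + PySem.List.pyGetD tc (start - 1) 0) hi1r.1 hi1r.2 (by rw [hdist]; omega)
          rw [hpeel, hi1, hrest, hdist, zero_add]
          -- fold the peeled step back into pvG
          have hd : ((finish - 1 - (start - 1)) % N).toNat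
              = (((finish - 1 - (start - 1)) % N - 1).toNat) + 1 := by omega
          have hunf : pvG tc N ((((finish - 1 - (start - 1)) % N - 1).toNat) + 1) (start - 1)
              = pvT tc N (start - 1)
                + pvG tc N (((finish - 1 - (start - 1)) % N - 1).toNat) (start - 1 + 1) := rfl
          have hgc : pvG tc N (((finish - 1 - (start - 1)) % N - 1).toNat) (start % N)
              = pvG tc N (((finish - 1 - (start - 1)) % N - 1).toNat) (start - 1 + 1) := by
            apply pvG_congr tc N hN
            rw [Int.emod_emod_of_dvd _ dvd_rfl]
            norm_num
          -- the peeled negative-index access equals the edge cost mod N (list length is exactly N)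
          have hsmod : (start - 1) % N = start - 1 + N := by
            rw [← pv_shift (start - 1) N]
            exact Int.emod_eq_of_lt (by omega) (by omega)
          have hT : pvT tc N (start - 1) = PySem.List.pyGetD tc (start - 1) 0 := by
            have hk : start - 1 = -(((1 - start).toNat : Nat) : Int) := by omega
            have hneg : PySem.List.pyGetD tc (start - 1) 0
                = tc.getD (tc.length - (1 - start).toNat) 0 := by
              rw [hk, PySem.List.pyGetD_neg_natCast tc ((1 - start).toNat) 0 (by omega) (by omega)]
              exact (List.getD_eq_getElem tc 0 (by omega)).symm
            have hpos : pvT tc N (start - 1) = tc.getD (start - 1 + N).toNat 0 := by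
              simp only [pvT, PySem.Int.mod_eq_emod_of_pos hN, hsmod]
              have hc : start - 1 + N = (((start - 1 + N).toNat : Nat) : Int) := by omega
              rw [hc, PySem.List.pyGetD_natCast, Int.toNat_natCast]
            have hidx : tc.length - (1 - start).toNat = (start - 1 + N).toNat := by omega
            rw [hpos, hneg, hidx]
          rw [hd, hunf, hgc, hT]
        · -- anticlockwise loop: peel the first step, then the invariant
          have hpeel : pvAcLoopA tc N (finish - 1) (N.natAbs + 1) (start - 1) 0
              = pvAcLoopA tc N (finish - 1) N.natAbs (PySem.Int.mod (start - 1 - 1 + N) N)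
                  (0 + PySem.List.pyGetD tc (PySem.Int.mod (start - 1 - 1 + N) N) 0) := by
            simp [pvAcLoopA, hsne]
          have hi1 : PySem.Int.mod (start - 1 - 1 + N) N = (start - 2) % N := by
            rw [PySem.Int.mod_eq_emod_of_pos hN,
              show start - 1 - 1 + N = start - 2 + N by ring]
            exact pv_shift _ N
          have hi1r : 0 ≤ (start - 2) % N ∧ (start - 2) % N < N :=
            ⟨Int.emod_nonneg _ (by omega), Int.emod_lt_of_pos _ hN⟩
          have hdist : ((start - 2) % N - (finish - 1)) % N
              = (start - 1 - (finish - 1)) % N - 1 := by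
            have e1 : ((start - 2) % N - (finish - 1)) % N = (start - 2 - (finish - 1)) % N := by
              rw [Int.sub_emod ((start - 2) % N) (finish - 1) N,
                Int.emod_emod_of_dvd _ dvd_rfl, ← Int.sub_emod]
            have e2 : (start - 2 - (finish - 1)) % N
                = ((start - 1 - (finish - 1)) % N - 1) % N := by
              have e3 : start - 2 - (finish - 1) = start - 1 - (finish - 1) - 1 := by ring
              rw [e3, Int.sub_emod (start - 1 - (finish - 1)) 1 N,
                Int.sub_emod ((start - 1 - (finish - 1)) % N) 1 N,
                Int.emod_emod_of_dvd _ dvd_rfl]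
            rw [e1, e2]
            exact Int.emod_eq_of_lt (by omega) (by omega)
          have hrest := pvAcLoopA_eq tc N (finish - 1) hN hf0 hfN N.natAbs ((start - 2) % N)
            (0 + PySem.List.pyGetD tc ((start - 2) % N) 0)
            hi1r.1 hi1r.2 (by rw [hdist]; omega)
          rw [hpeel, hi1, hrest, hdist, zero_add]
          -- fold the peeled step back as the LAST edge of the anticlockwise arc (pvG_snoc)
          have hd : ((start - 1 - (finish - 1)) % N).toNat
              = (((start - 1 - (finish - 1)) % N - 1).toNat) + 1 := by omega
          have hsn : pvG tc N ((((start - 1 - (finish - 1)) % N - 1).toNat) + 1)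
                (start - 1 - (start - 1 - (finish - 1)) % N)
              = pvG tc N (((start - 1 - (finish - 1)) % N - 1).toNat)
                  (start - 1 - (start - 1 - (finish - 1)) % N)
                + pvT tc N (start - 1 - (start - 1 - (finish - 1)) % N
                    + ((((start - 1 - (finish - 1)) % N - 1).toNat : Nat) : Int)) :=
            pvG_snoc tc N _ _
          have hcast : ((((start - 1 - (finish - 1)) % N - 1).toNat : Nat) : Int)
              = (start - 1 - (finish - 1)) % N - 1 := by omega
          have hidx : start - 1 - (start - 1 - (finish - 1)) % N
              + ((start - 1 - (finish - 1)) % N - 1) = start - 2 := by ring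
          have hTeq : PySem.List.pyGetD tc ((start - 2) % N) 0
              = pvT tc N (start - 2) := by
            simp only [pvT, PySem.Int.mod_eq_emod_of_pos hN]
          have hgc : pvG tc N (((start - 1 - (finish - 1)) % N - 1).toNat)
                ((start - 2) % N - ((start - 1 - (finish - 1)) % N - 1))
              = pvG tc N (((start - 1 - (finish - 1)) % N - 1).toNat)
                  (start - 1 - (start - 1 - (finish - 1)) % N) := by
            apply pvG_congr tc N hN
            rw [Int.sub_emod ((start - 2) % N) _ N, Int.emod_emod_of_dvd _ dvd_rfl,
              ← Int.sub_emod]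
            have e : start - 2 - ((start - 1 - (finish - 1)) % N - 1)
                = start - 1 - (start - 1 - (finish - 1)) % N := by ring
            rw [e]
          rw [hgc, hd, hsn, hcast, hidx, hTeq]
          ring
    obtain ⟨hxy, hA1, hA2⟩ := key
    rw [hA1, hA2, htot, hcwB]
    have hkey := pv_hkey tc N (start - 1) (finish - 1) hN hxy
    omega
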